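-- pv_equiv track=rewrite | github.com/Jonasw17/AoE2_ChatBot | manager/data_manager.py | get_unit_classification
-- ===== SOURCE A (Python) =====
-- def get_unit_classification(unit_data, display_name=''):
--     """Determine unit classification based on unit data.
--     Checks internal_name first, then falls back to the display name so that
--     units whose internal_name does not match (e.g. stored as an abbreviation
--     or numeric key) are still classified correctly.
--     """
--     unit_type = unit_data.get('internal_name', '').upper()
--     # Combine both so either one can produce a match
--     search = unit_type + ' ' + display_name.upper()
--
--     if any(x in search for x in ['ARCH', 'XBOW', 'LARCH', 'ARBALEST', 'CROSSBOW']):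
--         if any(x in search for x in ['CAVALRY ARCH', 'CAV ARCH', 'HCAVAL', 'AARCH']):
--             return 'Cavalry Archer'
--         return 'Archer'
--     elif any(x in search for x in ['SPEAR', 'PIKE', 'HALBERD']):
--         return 'Infantry'
--     elif any(x in search for x in ['SWORD', 'MILITIA', 'EAGLE', 'CONDOT',
--                                    'CHAMPION', 'LONGSWORD', 'MAN-AT-ARMS']):
--         return 'Infantry'
--     elif any(x in search for x in ['KNIGHT', 'PALADIN', 'PALAD',
--                                    'HUSSAR', 'LANCER', 'CAVALIER']):
--         return 'Cavalry'
--     elif 'CAVAL' in search and 'ARCH' not in search: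
--         return 'Cavalry'
--     elif any(x in search for x in ['SCORP', 'ONAGER', 'ONAGR', 'TREBUCHET',
--                                    'TREB', ' RAM', 'BMBC', 'CANNON',
--                                    'MANGONEL', 'BALLISTA']):
--         return 'Siege'
--     elif any(x in search for x in ['MONK', 'PRIEST']):
--         return 'Monk'
--     elif any(x in search for x in ['SKIRMISHER', 'SKIRM']):
--         return 'Archer'
--
--     return 'Other'
-- ===== SOURCE B (Python) =====
-- # Two-stage classifier: one flat scan over a keyword->tag table collects the
-- # full set of matched tags, then a small decision step maps the tag set to a
-- # label (A instead short-circuits through an if/elif cascade of any() scans).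
-- _FLAT = [
--     ('ARCH', 'A'), ('XBOW', 'A'), ('LARCH', 'A'), ('ARBALEST', 'A'), ('CROSSBOW', 'A'),
--     ('CAVALRY ARCH', 'C'), ('CAV ARCH', 'C'), ('HCAVAL', 'C'), ('AARCH', 'C'),
--     ('SPEAR', 'S'), ('PIKE', 'S'), ('HALBERD', 'S'),
--     ('SWORD', 'W'), ('MILITIA', 'W'), ('EAGLE', 'W'), ('CONDOT', 'W'),
--     ('CHAMPION', 'W'), ('LONGSWORD', 'W'), ('MAN-AT-ARMS', 'W'),
--     ('KNIGHT', 'K'), ('PALADIN', 'K'), ('PALAD', 'K'),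
--     ('HUSSAR', 'K'), ('LANCER', 'K'), ('CAVALIER', 'K'),
--     ('CAVAL', 'V'), ('ARCH', 'R'),
--     ('SCORP', 'G'), ('ONAGER', 'G'), ('ONAGR', 'G'), ('TREBUCHET', 'G'),
--     ('TREB', 'G'), (' RAM', 'G'), ('BMBC', 'G'), ('CANNON', 'G'),
--     ('MANGONEL', 'G'), ('BALLISTA', 'G'),
--     ('MONK', 'M'), ('PRIEST', 'M'),
--     ('SKIRMISHER', 'I'), ('SKIRM', 'I'),
-- ]
--
--
-- def get_unit_classification(unit_data, display_name=''):
--     search = unit_data.get('internal_name', '').upper() + ' ' + display_name.upper()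
--     # stage 1: which tag groups have at least one keyword in the search string
--     tags = {t for kw, t in _FLAT if kw in search}
--     # stage 2: tag set -> label
--     if 'A' in tags:
--         return 'Cavalry Archer' if 'C' in tags else 'Archer'
--     if 'S' in tags or 'W' in tags:
--         return 'Infantry'
--     if 'K' in tags or ('V' in tags and 'R' not in tags):
--         return 'Cavalry'
--     if 'G' in tags:
--         return 'Siege'
--     if 'M' in tags:
--         return 'Monk'
--     if 'I' in tags:
--         return 'Archer'
--     return 'Other'
-- ===== Notes on version B (the rewrite author's own statement) =====
-- stated objective: alternative
-- what changed: A's short-circuiting if/elif cascade of per-branch any() scans is replaced by a two-stage classifier: one flat scan over a single keyword-to-tag table builds the set of all matched tags, then a small decision step maps that tag set to the label.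
import Mathlib
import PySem

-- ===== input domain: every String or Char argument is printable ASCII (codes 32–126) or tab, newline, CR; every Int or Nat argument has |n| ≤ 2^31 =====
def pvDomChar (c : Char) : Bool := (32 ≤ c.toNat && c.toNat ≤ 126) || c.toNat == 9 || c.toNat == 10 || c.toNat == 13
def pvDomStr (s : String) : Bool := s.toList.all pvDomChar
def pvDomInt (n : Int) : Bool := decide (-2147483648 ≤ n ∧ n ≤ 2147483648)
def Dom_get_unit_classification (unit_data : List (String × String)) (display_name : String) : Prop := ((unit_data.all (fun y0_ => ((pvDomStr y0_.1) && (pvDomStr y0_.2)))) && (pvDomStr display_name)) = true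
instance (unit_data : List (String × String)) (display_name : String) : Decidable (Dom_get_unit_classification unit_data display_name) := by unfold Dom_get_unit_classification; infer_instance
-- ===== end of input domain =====

-- B splits the work into two stages — one flat scan over a keyword→tag table collecting the set of matched tags, then a tag-set→label decision — instead of A's if/elif cascade of per-branch any() scans (alternative decomposition, same cost).


-- ===== PORT A =====
-- 'any(x in search for x in L)' on a literal keyword list
def pvAnyIn (kws : List String) (s : List Char) : Bool :=
  kws.any (fun x => PySem.Chars.isIn x.toList s)

def get_unit_classification (unit_data : List (String × String)) (display_name : String) : String :=
  let unit_type := PySem.Chars.upper ((PySem.Dict.ofList unit_data).getD "internal_name" "").toList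
  let search := unit_type ++ ' ' :: PySem.Chars.upper display_name.toList
  if pvAnyIn ["ARCH", "XBOW", "LARCH", "ARBALEST", "CROSSBOW"] search then
    if pvAnyIn ["CAVALRY ARCH", "CAV ARCH", "HCAVAL", "AARCH"] search then "Cavalry Archer"
    else "Archer"
  else if pvAnyIn ["SPEAR", "PIKE", "HALBERD"] search then "Infantry"
  else if pvAnyIn ["SWORD", "MILITIA", "EAGLE", "CONDOT", "CHAMPION", "LONGSWORD", "MAN-AT-ARMS"] search then "Infantry"
  else if pvAnyIn ["KNIGHT", "PALADIN", "PALAD", "HUSSAR", "LANCER", "CAVALIER"] search then "Cavalry"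
  else if PySem.Chars.isIn "CAVAL".toList search && !PySem.Chars.isIn "ARCH".toList search then "Cavalry"
  else if pvAnyIn ["SCORP", "ONAGER", "ONAGR", "TREBUCHET", "TREB", " RAM", "BMBC", "CANNON", "MANGONEL", "BALLISTA"] search then "Siege"
  else if pvAnyIn ["MONK", "PRIEST"] search then "Monk"
  else if pvAnyIn ["SKIRMISHER", "SKIRM"] search then "Archer"
  else "Other"

-- ===== PORT B =====
-- the flat keyword→tag table '_FLAT'
def pvFlat : List (String × String) :=
  [ ("ARCH", "A"), ("XBOW", "A"), ("LARCH", "A"), ("ARBALEST", "A"), ("CROSSBOW", "A"),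
    ("CAVALRY ARCH", "C"), ("CAV ARCH", "C"), ("HCAVAL", "C"), ("AARCH", "C"),
    ("SPEAR", "S"), ("PIKE", "S"), ("HALBERD", "S"),
    ("SWORD", "W"), ("MILITIA", "W"), ("EAGLE", "W"), ("CONDOT", "W"),
    ("CHAMPION", "W"), ("LONGSWORD", "W"), ("MAN-AT-ARMS", "W"),
    ("KNIGHT", "K"), ("PALADIN", "K"), ("PALAD", "K"),
    ("HUSSAR", "K"), ("LANCER", "K"), ("CAVALIER", "K"),
    ("CAVAL", "V"), ("ARCH", "R"),
    ("SCORP", "G"), ("ONAGER", "G"), ("ONAGR", "G"), ("TREBUCHET", "G"),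
    ("TREB", "G"), (" RAM", "G"), ("BMBC", "G"), ("CANNON", "G"),
    ("MANGONEL", "G"), ("BALLISTA", "G"),
    ("MONK", "M"), ("PRIEST", "M"),
    ("SKIRMISHER", "I"), ("SKIRM", "I") ]

-- stage 1: "tags = {t for kw, t in _FLAT if kw in search}"
def pvTags (s : List Char) : PySem.Set String :=
  PySem.Set.ofList ((pvFlat.filter (fun p => PySem.Chars.isIn p.1.toList s)).map Prod.snd)

-- stage 2: the tag-set → label decision
def pvDecide (tags : PySem.Set String) : String :=
  if PySem.Set.contains tags "A" then
    if PySem.Set.contains tags "C" then "Cavalry Archer" else "Archer"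
  else if PySem.Set.contains tags "S" || PySem.Set.contains tags "W" then "Infantry"
  else if PySem.Set.contains tags "K" || (PySem.Set.contains tags "V" && !PySem.Set.contains tags "R") then "Cavalry"
  else if PySem.Set.contains tags "G" then "Siege"
  else if PySem.Set.contains tags "M" then "Monk"
  else if PySem.Set.contains tags "I" then "Archer"
  else "Other"

def get_unit_classification_alt (unit_data : List (String × String)) (display_name : String) : String :=
  let search := PySem.Chars.upper ((PySem.Dict.ofList unit_data).getD "internal_name" "").toList ++
                ' ' :: PySem.Chars.upper display_name.toList
  pvDecide (pvTags search)

-- ===== PRECONDITION & SPEC =====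
def Spec_get_unit_classification (unit_data : List (String × String)) (display_name : String) (out : String) : Prop := out = get_unit_classification_alt unit_data display_name
instance (unit_data : List (String × String)) (display_name : String) (out : String) : Decidable (Spec_get_unit_classification unit_data display_name out) := by unfold Spec_get_unit_classification; infer_instance

-- ===== CLAIM (what is proved, stated in full; the proofs are below) =====
def Claim_equal_get_unit_classification : Prop := ∀ (unit_data : List (String × String)) (display_name : String), Dom_get_unit_classification unit_data display_name → Spec_get_unit_classification unit_data display_name (get_unit_classification unit_data display_name)

-- ===== LEMMAS AND PROOFS =====
-- a tag is in the collected set iff some keyword carrying that tag occurs in s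
theorem pv_tag_iff (s : List Char) (t : String) :
    PySem.Set.contains (pvTags s) t = true ↔
    ∃ p ∈ pvFlat, PySem.Chars.isIn p.1.toList s = true ∧ p.2 = t := by
  rw [PySem.Set.contains_iff]
  simp only [pvTags, PySem.Set.mem_ofList, List.mem_map, List.mem_filter]
  constructor
  · rintro ⟨p, ⟨hp, hin⟩, rfl⟩; exact ⟨p, hp, hin, rfl⟩
  · rintro ⟨p, hp, hin, rfl⟩; exact ⟨p, ⟨hp, hin⟩, rfl⟩

theorem pv_tag (s : List Char) (t : String) (kws : List String)
    (h : ∀ p, p ∈ pvFlat → p.2 = t → p.1 ∈ kws)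
    (hn : ∀ k ∈ kws, (k, t) ∈ pvFlat) :
    PySem.Set.contains (pvTags s) t = pvAnyIn kws s := by
  rcases hb : pvAnyIn kws s with _ | _
  · rcases hc : PySem.Set.contains (pvTags s) t with _ | _
    · rfl
    · exfalso
      obtain ⟨p, hp, hin, ht⟩ := (pv_tag_iff s t).mp hc
      have : p.1 ∈ kws := h p hp ht
      have : pvAnyIn kws s = true := by
        simp [pvAnyIn, List.any_eq_true]; exact ⟨p.1, this, hin⟩
      simp [hb] at this
  · obtain ⟨k, hk, hin⟩ := by simpa [pvAnyIn, List.any_eq_true] using hb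
    exact (pv_tag_iff s t).mpr ⟨(k, t), hn k hk, hin, rfl⟩

-- the ten tag groups, read off the table
theorem tagA (s : List Char) : PySem.Set.contains (pvTags s) "A" = pvAnyIn ["ARCH", "XBOW", "LARCH", "ARBALEST", "CROSSBOW"] s := by
  refine pv_tag s _ _ ?_ ?_
  · intro p hp ht; fin_cases hp <;> simp_all
  · intro k hk; fin_cases hk <;> decide
theorem tagC (s : List Char) : PySem.Set.contains (pvTags s) "C" = pvAnyIn ["CAVALRY ARCH", "CAV ARCH", "HCAVAL", "AARCH"] s := by
  refine pv_tag s _ _ ?_ ?_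
  · intro p hp ht; fin_cases hp <;> simp_all
  · intro k hk; fin_cases hk <;> decide
theorem tagS (s : List Char) : PySem.Set.contains (pvTags s) "S" = pvAnyIn ["SPEAR", "PIKE", "HALBERD"] s := by
  refine pv_tag s _ _ ?_ ?_
  · intro p hp ht; fin_cases hp <;> simp_all
  · intro k hk; fin_cases hk <;> decide
theorem tagW (s : List Char) : PySem.Set.contains (pvTags s) "W" = pvAnyIn ["SWORD", "MILITIA", "EAGLE", "CONDOT", "CHAMPION", "LONGSWORD", "MAN-AT-ARMS"] s := by
  refine pv_tag s _ _ ?_ ?_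
  · intro p hp ht; fin_cases hp <;> simp_all
  · intro k hk; fin_cases hk <;> decide
theorem tagK (s : List Char) : PySem.Set.contains (pvTags s) "K" = pvAnyIn ["KNIGHT", "PALADIN", "PALAD", "HUSSAR", "LANCER", "CAVALIER"] s := by
  refine pv_tag s _ _ ?_ ?_
  · intro p hp ht; fin_cases hp <;> simp_all
  · intro k hk; fin_cases hk <;> decide
theorem tagV (s : List Char) : PySem.Set.contains (pvTags s) "V" = pvAnyIn ["CAVAL"] s := by
  refine pv_tag s _ _ ?_ ?_
  · intro p hp ht; fin_cases hp <;> simp_all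
  · intro k hk; fin_cases hk; decide
theorem tagR (s : List Char) : PySem.Set.contains (pvTags s) "R" = pvAnyIn ["ARCH"] s := by
  refine pv_tag s _ _ ?_ ?_
  · intro p hp ht; fin_cases hp <;> simp_all
  · intro k hk; fin_cases hk; decide
theorem tagG (s : List Char) : PySem.Set.contains (pvTags s) "G" = pvAnyIn ["SCORP", "ONAGER", "ONAGR", "TREBUCHET", "TREB", " RAM", "BMBC", "CANNON", "MANGONEL", "BALLISTA"] s := by
  refine pv_tag s _ _ ?_ ?_
  · intro p hp ht; fin_cases hp <;> simp_all
  · intro k hk; fin_cases hk <;> decide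
theorem tagM (s : List Char) : PySem.Set.contains (pvTags s) "M" = pvAnyIn ["MONK", "PRIEST"] s := by
  refine pv_tag s _ _ ?_ ?_
  · intro p hp ht; fin_cases hp <;> simp_all
  · intro k hk; fin_cases hk <;> decide
theorem tagI (s : List Char) : PySem.Set.contains (pvTags s) "I" = pvAnyIn ["SKIRMISHER", "SKIRM"] s := by
  refine pv_tag s _ _ ?_ ?_
  · intro p hp ht; fin_cases hp <;> simp_all
  · intro k hk; fin_cases hk <;> decide

-- A's cascade equals B's two-stage classifier on every search string
theorem pv_chain_eq_decide (s : List Char) :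
    (if pvAnyIn ["ARCH", "XBOW", "LARCH", "ARBALEST", "CROSSBOW"] s then
       if pvAnyIn ["CAVALRY ARCH", "CAV ARCH", "HCAVAL", "AARCH"] s then "Cavalry Archer"
       else "Archer"
     else if pvAnyIn ["SPEAR", "PIKE", "HALBERD"] s then "Infantry"
     else if pvAnyIn ["SWORD", "MILITIA", "EAGLE", "CONDOT", "CHAMPION", "LONGSWORD", "MAN-AT-ARMS"] s then "Infantry"
     else if pvAnyIn ["KNIGHT", "PALADIN", "PALAD", "HUSSAR", "LANCER", "CAVALIER"] s then "Cavalry"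
     else if PySem.Chars.isIn "CAVAL".toList s && !PySem.Chars.isIn "ARCH".toList s then "Cavalry"
     else if pvAnyIn ["SCORP", "ONAGER", "ONAGR", "TREBUCHET", "TREB", " RAM", "BMBC", "CANNON", "MANGONEL", "BALLISTA"] s then "Siege"
     else if pvAnyIn ["MONK", "PRIEST"] s then "Monk"
     else if pvAnyIn ["SKIRMISHER", "SKIRM"] s then "Archer"
     else "Other") = pvDecide (pvTags s) := by
  unfold pvDecide
  rw [tagA, tagC, tagS, tagW, tagK, tagV, tagR, tagG, tagM, tagI]
  have hv : pvAnyIn ["CAVAL"] s = PySem.Chars.isIn "CAVAL".toList s := by simp [pvAnyIn]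
  have hr : pvAnyIn ["ARCH"] s = PySem.Chars.isIn "ARCH".toList s := by simp [pvAnyIn]
  rw [hv, hr]
  by_cases h1 : pvAnyIn ["ARCH", "XBOW", "LARCH", "ARBALEST", "CROSSBOW"] s = true <;>
  by_cases h2 : pvAnyIn ["SPEAR", "PIKE", "HALBERD"] s = true <;>
  by_cases h3 : pvAnyIn ["SWORD", "MILITIA", "EAGLE", "CONDOT", "CHAMPION", "LONGSWORD", "MAN-AT-ARMS"] s = true <;>
  by_cases h4 : pvAnyIn ["KNIGHT", "PALADIN", "PALAD", "HUSSAR", "LANCER", "CAVALIER"] s = true <;>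
  by_cases h5 : (PySem.Chars.isIn "CAVAL".toList s && !PySem.Chars.isIn "ARCH".toList s) = true <;>
  simp [*]

-- ===== VERDICT (by name: the statement is the Claim_ definition above) =====
theorem get_unit_classification_spec : Claim_equal_get_unit_classification := by
  intro unit_data display_name _
  unfold Spec_get_unit_classification get_unit_classification get_unit_classification_alt
  exact pv_chain_eq_decide _
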